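-- pv_equiv track=rewrite | github.com/Sakamotto/IFES_Prog2 | Programas/Exercicio 5.py | uniao
-- ===== SOURCE A (Python) =====
-- def separaPal(pTexto):
-- 	strSeparadores = ' ,.:;!?'
-- 	strBuffer = ""
-- 	lstPalavras = []
--
-- 	for i in range(len(pTexto)):
-- 		if pTexto[i] not in strSeparadores:
-- 			strBuffer += pTexto[i]
-- 		elif strBuffer != "":
-- 			lstPalavras.append(strBuffer)
-- 			strBuffer = ""
-- 		#
-- 	#
-- 	if strBuffer != "":
-- 		lstPalavras.append(strBuffer)
-- 	#
-- 	return lstPalavras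
--
-- def uniao(pTexto1, pTexto2):
-- 	lstTexto1 = separaPal(pTexto1)
-- 	lstTexto2 = separaPal(pTexto2)
-- 	u = []
--
-- 	for texto1 in lstTexto1:
-- 		if texto1 not in u:
-- 			u.append(texto1)
-- 		#
-- 	#
--
-- 	for texto2 in lstTexto2:
-- 		if texto2 not in u:
-- 			u.append(texto2)
-- 		#
-- 	#
--
-- 	return u
-- ===== SOURCE B (Python) =====
-- def uniao(pTexto1, pTexto2):
--     seps = set(' ,.:;!?')
--
--     def tokens(s):
--         out, i, n = [], 0, len(s)
--         while i < n:
--             while i < n and s[i] in seps: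
--                 i += 1
--             j = i
--             while j < n and s[j] not in seps:
--                 j += 1
--             if j > i:
--                 out.append(s[i:j])
--             i = j
--         return out
--
--     return list(dict.fromkeys(tokens(pTexto1) + tokens(pTexto2)))
-- ===== Notes on version B (the rewrite author's own statement) =====
-- stated objective: idiomatic
-- what changed: Tokenization by two-pointer maximal-run extraction (skip separators, slice out the whole run) instead of A's char-by-char buffer state machine, and a single dict.fromkeys dedup over the concatenated token list instead of A's two loops with a linear 'not in u' membership scan.
import Mathlib
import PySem

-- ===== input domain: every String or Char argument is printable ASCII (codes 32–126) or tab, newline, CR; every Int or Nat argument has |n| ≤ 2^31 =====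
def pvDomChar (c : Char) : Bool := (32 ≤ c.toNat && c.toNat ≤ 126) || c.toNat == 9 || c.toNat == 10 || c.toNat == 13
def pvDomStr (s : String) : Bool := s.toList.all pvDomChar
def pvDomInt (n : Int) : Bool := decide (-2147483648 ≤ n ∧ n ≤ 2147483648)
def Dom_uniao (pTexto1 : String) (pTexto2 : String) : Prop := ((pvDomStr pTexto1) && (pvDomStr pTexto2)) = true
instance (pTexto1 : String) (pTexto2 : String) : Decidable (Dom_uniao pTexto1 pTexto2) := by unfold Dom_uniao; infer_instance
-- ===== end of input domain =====

-- B replaces A's char-by-char buffer state machine and its two membership-scan dedup loops by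
-- two-pointer maximal-run tokenization plus a single ordered-dict dedup pass (objective: idiomatic).

-- ===== PORT A =====
-- strSeparadores = ' ,.:;!?'
def pvSepsA : List Char := [' ', ',', '.', ':', ';', '!', '?']

-- body of A's for-loop over the characters: state = (strBuffer, lstPalavras)
def pvSepStep (st : List Char × List String) (c : Char) : List Char × List String :=
  if ¬ pvSepsA.contains c then (st.1 ++ [c], st.2)
  else if st.1 ≠ [] then ([], st.2 ++ [String.ofList st.1])
  else st

-- final 'if strBuffer != "": lstPalavras.append(strBuffer)'
def pvFlush (st : List Char × List String) : List String :=
  if st.1 ≠ [] then st.2 ++ [String.ofList st.1] else st.2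

def separaPal (pTexto : String) : List String :=
  pvFlush (pTexto.toList.foldl pvSepStep ([], []))

-- body of A's 'if texto not in u: u.append(texto)' loops
def pvUniaoStep (u : List String) (x : String) : List String :=
  if x ∈ u then u else u ++ [x]

def uniao (pTexto1 : String) (pTexto2 : String) : List String :=
  let lstTexto1 := separaPal pTexto1
  let lstTexto2 := separaPal pTexto2
  lstTexto2.foldl pvUniaoStep (lstTexto1.foldl pvUniaoStep [])

-- ===== PORT B =====
-- seps = set(' ,.:;!?')
def pvIsSep (c : Char) : Bool := (PySem.Set.ofList [' ', ',', '.', ':', ';', '!', '?']).contains c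

-- B's two-pointer scanner: skip separators, slice out the maximal non-separator run
def pvTokens (cs : List Char) : List String :=
  let r := cs.dropWhile pvIsSep
  if _h : r = [] then []
  else
    String.ofList (r.takeWhile (fun d => !pvIsSep d)) ::
      pvTokens (r.dropWhile (fun d => !pvIsSep d))
termination_by cs.length
decreasing_by
  obtain ⟨c, rest, hr⟩ := List.exists_cons_of_ne_nil _h
  have hr' : cs.dropWhile pvIsSep = c :: rest := hr
  have hne : cs.dropWhile pvIsSep ≠ [] := by rw [hr']; simp
  have hc : pvIsSep c = false := by
    have h3 := List.head_dropWhile_not (p := pvIsSep) (l := cs) hne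
    simp [hr'] at h3
    simpa using h3
  have h1 : (c :: rest).length ≤ cs.length := by
    rw [← hr']; exact cs.length_dropWhile_le pvIsSep
  rw [hr']
  simp only [List.dropWhile_cons, hc]
  have h2 := rest.length_dropWhile_le (fun d => !pvIsSep d)
  simp at h1 ⊢
  omega

def uniao_alt (pTexto1 : String) (pTexto2 : String) : List String :=
  PySem.List.dedup (pvTokens pTexto1.toList ++ pvTokens pTexto2.toList)

-- ===== PRECONDITION & SPEC =====
def Spec_uniao (pTexto1 : String) (pTexto2 : String) (out : List String) : Prop := out = uniao_alt pTexto1 pTexto2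
instance (pTexto1 : String) (pTexto2 : String) (out : List String) : Decidable (Spec_uniao pTexto1 pTexto2 out) := by unfold Spec_uniao; infer_instance

-- ===== CLAIM (what is proved, stated in full; the proofs are below) =====
def Claim_equal_uniao : Prop := ∀ (pTexto1 : String) (pTexto2 : String), Dom_uniao pTexto1 pTexto2 → Spec_uniao pTexto1 pTexto2 (uniao pTexto1 pTexto2)

-- ===== LEMMAS AND PROOFS =====

-- the two separator tests coincide
lemma pvIsSep_eq (c : Char) : pvIsSep c = pvSepsA.contains c := by
  simp [pvIsSep, pvSepsA, PySem.Set.ofList, PySem.Set.add, PySem.Set.empty, PySem.Set.contains]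

lemma pvTokens_nil : pvTokens [] = [] := by
  rw [pvTokens.eq_def]; simp

-- a leading separator is skipped
lemma pvTokens_sep_cons (c : Char) (cs : List Char) (hc : pvIsSep c = true) :
    pvTokens (c :: cs) = pvTokens cs := by
  rw [pvTokens.eq_def, pvTokens.eq_def]
  simp [hc]

-- a nonempty separator-free prefix up to a separator is exactly the next token
lemma pvTokens_run (buf : List Char) (c : Char) (cs : List Char) (hbuf : buf ≠ [])
    (hb : ∀ b ∈ buf, pvIsSep b = false) (hc : pvIsSep c = true) :
    pvTokens (buf ++ c :: cs) = String.ofList buf :: pvTokens (c :: cs) := by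
  obtain ⟨b, bs, rfl⟩ := List.exists_cons_of_ne_nil hbuf
  have hbb : pvIsSep b = false := hb b (by simp)
  have hnb : ∀ x ∈ b :: bs, (fun d => !pvIsSep d) x = true := by
    intro x hx; simp [hb x hx]
  have h1 : (b :: bs ++ c :: cs).dropWhile pvIsSep = b :: bs ++ c :: cs := by
    simp [hbb]
  have htake2 : (b :: bs ++ c :: cs).takeWhile (fun d => !pvIsSep d) = b :: bs := by
    rw [show (b :: bs ++ c :: cs : List Char) = (b :: bs) ++ (c :: cs) from rfl,
        List.takeWhile_append_of_pos hnb]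
    simp [hc]
  have hdrop2 : (b :: bs ++ c :: cs).dropWhile (fun d => !pvIsSep d) = c :: cs := by
    rw [show (b :: bs ++ c :: cs : List Char) = (b :: bs) ++ (c :: cs) from rfl,
        List.dropWhile_append_of_pos hnb]
    simp [hc]
  rw [pvTokens.eq_def]
  simp only [h1, htake2, hdrop2]
  simp

-- all of buf separator-free and nonempty: the whole list is one token
lemma pvTokens_all (buf : List Char) (hbuf : buf ≠ [])
    (hb : ∀ b ∈ buf, pvIsSep b = false) :
    pvTokens buf = [String.ofList buf] := by
  obtain ⟨b, bs, rfl⟩ := List.exists_cons_of_ne_nil hbuf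
  have hbb : pvIsSep b = false := hb b (by simp)
  have htake : (b :: bs).takeWhile (fun d => !pvIsSep d) = b :: bs := by
    rw [List.takeWhile_eq_self_iff]
    intro x hx; simp [hb x hx]
  have hdrop : (b :: bs).dropWhile (fun d => !pvIsSep d) = [] := by
    rw [List.dropWhile_eq_nil_iff]
    intro x hx; simp [hb x hx]
  have h1 : (b :: bs).dropWhile pvIsSep = b :: bs := by
    simp [hbb]
  rw [pvTokens.eq_def]
  simp only [h1, htake, hdrop, pvTokens_nil]
  simp

-- A's buffer loop, flushed, produces B's token list
lemma pvFold_tokens (cs : List Char) : ∀ (buf : List Char) (acc : List String),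
    (∀ b ∈ buf, pvIsSep b = false) →
    pvFlush (cs.foldl pvSepStep (buf, acc)) = acc ++ pvTokens (buf ++ cs) := by
  induction cs with
  | nil =>
      intro buf acc hb
      by_cases hbuf : buf = []
      · subst hbuf; simp [pvFlush, pvTokens_nil]
      · simp only [List.foldl_nil, List.append_nil]
        rw [pvTokens_all buf hbuf hb]
        simp [pvFlush, hbuf]
  | cons c cs ih =>
      intro buf acc hb
      by_cases hsep : pvIsSep c = true
      · have hsc : pvSepsA.contains c = true := by rw [← pvIsSep_eq]; exact hsep
        by_cases hbuf : buf = []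
        · subst hbuf
          have hmem : c ∈ pvSepsA := List.mem_of_elem_eq_true hsc
          have hstep : pvSepStep ([], acc) c = ([], acc) := by
            simp [pvSepStep, hmem]
          rw [List.foldl_cons, hstep, ih [] acc (by simp)]
          simp [pvTokens_sep_cons c cs hsep]
        · have hmem : c ∈ pvSepsA := List.mem_of_elem_eq_true hsc
          have hstep : pvSepStep (buf, acc) c = ([], acc ++ [String.ofList buf]) := by
            simp [pvSepStep, hmem, hbuf]
          rw [List.foldl_cons, hstep, ih [] (acc ++ [String.ofList buf]) (by simp)]
          rw [List.nil_append, pvTokens_run buf c cs hbuf hb hsep, pvTokens_sep_cons c cs hsep]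
          simp
      · have hns : pvIsSep c = false := by simpa using hsep
        have hsc : pvSepsA.contains c = false := by rw [← pvIsSep_eq]; exact hns
        have hmem : c ∉ pvSepsA := by simpa using hsc
        have hstep : pvSepStep (buf, acc) c = (buf ++ [c], acc) := by
          simp [pvSepStep, hmem]
        rw [List.foldl_cons, hstep,
            ih (buf ++ [c]) acc (by
              intro x hx
              rcases List.mem_append.1 hx with h | h
              · exact hb x h
              · simp at h; subst h; exact hns)]
        simp

lemma separaPal_eq (t : String) : separaPal t = pvTokens t.toList := by
  have := pvFold_tokens t.toList [] [] (by simp)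
  simpa [separaPal] using this

-- A's membership-append loop body is exactly PySem.Set.add
lemma pvUniaoStep_eq_add (u : List String) (x : String) : pvUniaoStep u x = PySem.Set.add u x := by
  unfold pvUniaoStep PySem.Set.add PySem.Set.contains
  simp

lemma foldl_uniaoStep (xs : List String) (acc : List String) :
    xs.foldl pvUniaoStep acc = xs.foldl PySem.Set.add acc := by
  induction xs generalizing acc with
  | nil => rfl
  | cons x xs ih => simp only [List.foldl_cons, pvUniaoStep_eq_add, ih]

-- ===== VERDICT (by name: the statement is the Claim_ definition above) =====
theorem uniao_spec : Claim_equal_uniao := by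
  intro t1 t2 _
  unfold Spec_uniao uniao uniao_alt
  rw [separaPal_eq, separaPal_eq, foldl_uniaoStep, foldl_uniaoStep,
      ← List.foldl_append]
  rfl
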